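-- pv_equiv track=rewrite | github.com/borisboriov/tokeon-bot | app/chunkers/book.py | _merge_lone_headers
-- ===== SOURCE A (Python) =====
-- def _merge_lone_headers(pieces: list[str]) -> list[str]:
--     """Merge tiny single-line chunks (chapter intros, headers) into the next."""
--     merged: list[str] = []
--     pending: str | None = None
--     for piece in pieces:
--         clean = piece.strip()
--         is_lone = len(clean) < 250 and "\n\n" not in clean
--         if pending is not None:
--             merged.append(pending + "\n\n" + piece)
--             pending = None
--         elif is_lone:
--             pending = piece
--         else:
--             merged.append(piece)
--     if pending is not None:
--         merged.append(pending)
--     return merged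
-- ===== SOURCE B (Python) =====
-- def _merge_lone_headers(pieces: list[str]) -> list[str]:
--     """Merge tiny single-line chunks (chapter intros, headers) into the next."""
--     merged: list[str] = []
--     i = 0
--     n = len(pieces)
--     while i < n:
--         piece = pieces[i]
--         clean = piece.strip()
--         if len(clean) < 250 and "\n\n" not in clean:
--             if i + 1 < n:
--                 merged.append(piece + "\n\n" + pieces[i + 1])
--                 i += 2
--             else:
--                 merged.append(piece)
--                 i += 1
--         else:
--             merged.append(piece)
--             i += 1
--     return merged
-- ===== Notes on version B (the rewrite author's own statement) =====
-- stated objective: simpler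
-- what changed: Replaces A's pending-accumulator state machine (a carried Optional flushed on the next iteration and again after the loop) with a while-loop over an index that, on seeing a lone piece, merges it with its successor immediately and advances by two, eliminating the pending state and the post-loop flush.
import Mathlib
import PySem

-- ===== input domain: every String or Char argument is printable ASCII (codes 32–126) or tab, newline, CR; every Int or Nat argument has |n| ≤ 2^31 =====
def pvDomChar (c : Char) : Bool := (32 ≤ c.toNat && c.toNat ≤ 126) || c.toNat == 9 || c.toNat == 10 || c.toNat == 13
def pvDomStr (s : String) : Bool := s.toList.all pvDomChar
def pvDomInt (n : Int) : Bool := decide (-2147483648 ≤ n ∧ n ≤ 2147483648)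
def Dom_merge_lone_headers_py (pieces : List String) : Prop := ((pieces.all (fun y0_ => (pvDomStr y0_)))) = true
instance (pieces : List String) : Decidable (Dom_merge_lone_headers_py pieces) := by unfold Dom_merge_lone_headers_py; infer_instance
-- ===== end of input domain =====

-- B replaces A's pending-accumulator state machine by a loop that merges a lone
-- piece with its successor immediately (advance by two); objective: simpler.


-- ===== PORT A =====
-- is_lone = len(piece.strip()) < 250 and "\n\n" not in piece.strip()
-- (both Pythons compute this same test on the current piece)
def mlhIsLone (piece : String) : Bool :=
  let clean := PySem.Str.strip piece
  decide (PySem.Str.len clean < 250) && !(PySem.Str.isIn "\n\n" clean)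

-- A's for-loop over pieces with state (merged, pending); the end-of-list case is
-- A's final 'if pending is not None: merged.append(pending)'.
def mlhLoopA : List String → List String → Option String → List String
  | [], merged, pending =>
    match pending with
    | some p => merged ++ [p]
    | none => merged
  | piece :: rest, merged, pending =>
    match pending with
    | some p => mlhLoopA rest (merged ++ [p ++ "\n\n" ++ piece]) none
    | none =>
      if mlhIsLone piece then mlhLoopA rest merged (some piece)
      else mlhLoopA rest (merged ++ [piece]) none

def merge_lone_headers_py (pieces : List String) : List String :=
  mlhLoopA pieces [] none

-- ===== PORT B =====
-- Source B's while-loop over an index into the (immutable) list, as recursion on the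
-- remaining suffix: a lone head is merged with its successor and both are consumed
-- (i += 2); otherwise one piece is emitted (i += 1).  The one-element case keeps
-- Source B's two branches (lone with no successor / not lone), which both emit the piece.
def merge_lone_headers_py_alt : List String → List String
  | [] => []
  | [piece] => if mlhIsLone piece then [piece] else [piece]
  | piece :: next :: rest =>
    if mlhIsLone piece then (piece ++ "\n\n" ++ next) :: merge_lone_headers_py_alt rest
    else piece :: merge_lone_headers_py_alt (next :: rest)

-- ===== PRECONDITION & SPEC =====
def Spec_merge_lone_headers_py (pieces : List String) (out : List String) : Prop := out = merge_lone_headers_py_alt pieces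
instance (pieces : List String) (out : List String) : Decidable (Spec_merge_lone_headers_py pieces out) := by unfold Spec_merge_lone_headers_py; infer_instance

-- ===== CLAIM (what is proved, stated in full; the proofs are below) =====
def Claim_equal_merge_lone_headers_py : Prop := ∀ (pieces : List String), Dom_merge_lone_headers_py pieces → Spec_merge_lone_headers_py pieces (merge_lone_headers_py pieces)

-- ===== LEMMAS AND PROOFS =====
-- Invariant: A's loop, started with no pending piece, appends B's result to the
-- accumulator.  Induction follows B's consumption pattern (one or two at a time).
theorem mlhLoopA_eq_alt (pieces : List String) :
    ∀ merged : List String, mlhLoopA pieces merged none = merged ++ merge_lone_headers_py_alt pieces := by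
  induction pieces using merge_lone_headers_py_alt.induct with
  | case1 => intro merged; simp [mlhLoopA, merge_lone_headers_py_alt]
  | case2 piece h => intro merged; simp [mlhLoopA, merge_lone_headers_py_alt, h]
  | case3 piece h => intro merged; simp [mlhLoopA, merge_lone_headers_py_alt, h]
  | case4 piece next rest h ih =>
    intro merged; simp [mlhLoopA, merge_lone_headers_py_alt, h, ih]
  | case5 piece next rest h ih =>
    intro merged
    have step : mlhLoopA (piece :: next :: rest) merged none
        = mlhLoopA (next :: rest) (merged ++ [piece]) none := by
      simp [mlhLoopA, h]
    rw [step, ih]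
    simp [merge_lone_headers_py_alt, h]

-- ===== VERDICT (by name: the statement is the Claim_ definition above) =====
theorem merge_lone_headers_py_spec : Claim_equal_merge_lone_headers_py := by
  intro pieces _
  unfold Spec_merge_lone_headers_py merge_lone_headers_py
  simpa using mlhLoopA_eq_alt pieces []
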